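-- pv_equiv track=rewrite | github.com/makany-milan/firstName-gender-NN | collect_artsy_artist_data.py | countPronouns
-- ===== SOURCE A (Python) =====
-- def countPronouns(text):
--     m = 0
--     f = 0
--     male_pronouns = ['he', 'his', 'him', 'himself']
--     female_pronouns = ['she', 'her', 'hers', 'herself']
--
--     words = text.split(' ')
--     for w in words:
--         wClean = w.replace(',', '').replace('.', '').lower()
--         if wClean in male_pronouns:
--             m += 1
--         if wClean in female_pronouns:
--             f += 1
--
--     return f, m
-- ===== SOURCE B (Python) =====
-- def countPronouns(text):
--     counts = {}
--     for w in text.split(' '):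
--         wc = w.replace(',', '').replace('.', '').lower()
--         counts[wc] = counts.get(wc, 0) + 1
--     f = sum(counts.get(p, 0) for p in ['she', 'her', 'hers', 'herself'])
--     m = sum(counts.get(p, 0) for p in ['he', 'his', 'him', 'himself'])
--     return f, m
-- ===== Notes on version B (the rewrite author's own statement) =====
-- stated objective: idiomatic
-- what changed: B builds one frequency table over the cleaned words in a branch-free pass and then reads the two totals by summing lookups over the fixed pronoun lists, instead of A's per-word membership tests against both lists with two running accumulators.
import Mathlib
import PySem

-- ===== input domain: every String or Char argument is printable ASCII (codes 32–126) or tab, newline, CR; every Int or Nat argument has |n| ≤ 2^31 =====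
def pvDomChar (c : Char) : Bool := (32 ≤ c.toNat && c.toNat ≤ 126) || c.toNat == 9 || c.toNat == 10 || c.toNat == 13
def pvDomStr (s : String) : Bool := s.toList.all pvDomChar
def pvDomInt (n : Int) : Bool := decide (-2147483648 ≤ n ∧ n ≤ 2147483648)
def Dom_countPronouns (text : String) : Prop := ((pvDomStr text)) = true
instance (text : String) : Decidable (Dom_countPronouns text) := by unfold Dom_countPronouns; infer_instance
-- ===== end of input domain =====

-- B replaces A's per-word membership branching by one frequency table built over the
-- cleaned words, with the two totals read off by summing lookups over the pronoun lists.

-- shared cleaning step: w.replace(',', '').replace('.', '').lower()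
def pvClean (w : String) : String :=
  PySem.Str.lower (PySem.Str.replace (PySem.Str.replace w "," "") "." "")

-- ===== PORT A =====
-- A's loop body (the two membership branches over the running (m, f) accumulators)
def pvStepA (acc : Int × Int) (w : String) : Int × Int :=
  let wClean := pvClean w
  let acc := if wClean ∈ (["he", "his", "him", "himself"] : List String)
             then (acc.1 + 1, acc.2) else acc
  if wClean ∈ (["she", "her", "hers", "herself"] : List String)
  then (acc.1, acc.2 + 1) else acc

def countPronouns (text : String) : Int × Int :=
  let words := (PySem.Str.split? text " ").getD []  -- sep ≠ "": split? is some here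
  let mf : Int × Int := words.foldl pvStepA (0, 0)
  (mf.2, mf.1)

-- ===== PORT B =====
def countPronouns_alt (text : String) : Int × Int :=
  let counts := ((PySem.Str.split? text " ").getD []).foldl
    (fun (d : PySem.Dict String Int) w =>
      let wc := pvClean w
      d.insert wc (d.getD wc 0 + 1)) PySem.Dict.empty
  let f := ((["she", "her", "hers", "herself"] : List String).map
    (fun p => counts.getD p 0)).sum
  let m := ((["he", "his", "him", "himself"] : List String).map
    (fun p => counts.getD p 0)).sum
  (f, m)

-- ===== PRECONDITION & SPEC =====
def Spec_countPronouns (text : String) (out : Int × Int) : Prop := out = countPronouns_alt text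
instance (text : String) (out : Int × Int) : Decidable (Spec_countPronouns text out) := by unfold Spec_countPronouns; infer_instance

-- ===== CLAIM (what is proved, stated in full; the proofs are below) =====
def Claim_equal_countPronouns : Prop := ∀ (text : String), Dom_countPronouns text → Spec_countPronouns text (countPronouns text)

-- ===== LEMMAS AND PROOFS =====

-- the loop body as two independent 0/1 increments
lemma stepA_eq (acc : Int × Int) (w : String) :
    pvStepA acc w =
      (acc.1 + (if pvClean w ∈ (["he", "his", "him", "himself"] : List String) then 1 else 0),
       acc.2 + (if pvClean w ∈ (["she", "her", "hers", "herself"] : List String) then 1 else 0)) := by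
  unfold pvStepA
  simp only [List.mem_cons, List.not_mem_nil, or_false]
  split_ifs <;> simp_all

-- A's loop, characterised: accumulators advance by the membership counts of the cleaned words
lemma foldA_eq (ws : List String) (m f : Int) :
    ws.foldl pvStepA (m, f)
    = (m + ((ws.map pvClean).countP
              (· ∈ (["he", "his", "him", "himself"] : List String)) : Int),
       f + ((ws.map pvClean).countP
              (· ∈ (["she", "her", "hers", "herself"] : List String)) : Int)) := by
  induction ws generalizing m f with
  | nil => simp
  | cons w ws ih =>
    rw [List.foldl_cons, stepA_eq, ih]
    simp only [List.map_cons, List.countP_cons]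
    by_cases hm : pvClean w ∈ (["he", "his", "him", "himself"] : List String) <;>
      by_cases hf : pvClean w ∈ (["she", "her", "hers", "herself"] : List String) <;>
      simp [hm, hf, add_assoc, add_comm]

-- the pronoun lists are duplicate-free, so membership count = sum of per-pronoun counts
lemma countP_female (l : List String) :
    ((l.countP (· ∈ (["she", "her", "hers", "herself"] : List String)) : Int))
      = (l.count "she" : Int) + l.count "her" + l.count "hers" + l.count "herself" := by
  induction l with
  | nil => simp
  | cons x l ih =>
    simp only [List.countP_cons, List.count_cons]
    split_ifs <;> simp_all <;> omega

lemma countP_male (l : List String) :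
    ((l.countP (· ∈ (["he", "his", "him", "himself"] : List String)) : Int))
      = (l.count "he" : Int) + l.count "his" + l.count "him" + l.count "himself" := by
  induction l with
  | nil => simp
  | cons x l ih =>
    simp only [List.countP_cons, List.count_cons]
    split_ifs <;> simp_all <;> omega

-- the cleaning step moved out of B's fold
lemma foldB_gen (ws : List String) (d : PySem.Dict String Int) :
    ws.foldl (fun (d : PySem.Dict String Int) w =>
      let wc := pvClean w
      d.insert wc (d.getD wc 0 + 1)) d
    = (ws.map pvClean).foldl (fun d x => d.insert x (d.getD x 0 + 1)) d := by
  induction ws generalizing d with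
  | nil => simp
  | cons w ws ih =>
    rw [List.foldl_cons, List.map_cons, List.foldl_cons]
    exact ih _

-- B's table is Counter(cleaned words)
lemma foldB_eq (ws : List String) :
    ws.foldl (fun (d : PySem.Dict String Int) w =>
      let wc := pvClean w
      d.insert wc (d.getD wc 0 + 1)) PySem.Dict.empty
    = PySem.Dict.counter (ws.map pvClean) := by
  rw [foldB_gen, PySem.Dict.foldl_insert_getD_add_one_eq_counter]

-- ===== VERDICT (by name: the statement is the Claim_ definition above) =====
theorem countPronouns_spec : Claim_equal_countPronouns := by
  intro text _
  unfold Spec_countPronouns countPronouns countPronouns_alt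
  simp only [foldA_eq, foldB_eq, PySem.Dict.getD_counter, List.map_cons, List.map_nil,
    List.sum_cons, List.sum_nil]
  rw [countP_female, countP_male]
  ring_nf
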